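-- pv_equiv track=rewrite | github.com/GIJack/arin-scraper | arin_scraper.py | cidr_convert
-- ===== SOURCE A (Python) =====
-- def cidr_convert(total):
--     '''Converts Total amount of IP addresses to coresponding cidr notation
--        address block, takes a single number'''
--     total = int(total)
--     #Static lookup table of the number of addresses for each CIDR notation network. We do the number of addresses as the key, because that is how they appear in ARIN files, and this function is used to convert those numbers into usable subnets.
--     cidr_dict = {16777216:"/8", 8388608:"/9", 4194304:"/10", 2097152:"/11", 1048576:"/12", 524288:"/13", 262144:"/14", 131072:"/15", 65536:"/16", 32768:"/17", 16384:"/18", 8192:"/19", 4096:"/20", 2048:"/21", 1024:"/22", 512:"/23", 256:"/24" ,128:"/25", 64:"/26", 32:"/27", 16:"/28", 8:"/29"}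
--     cidr_list = sorted(cidr_dict,reverse=True)
--     #for whatever reason, not all entries in the ARIN status file are strictly CIDR blocks. Sometimes multiple concurrent blocks are grouped together.
--     if total not in cidr_dict:
--         for subnet in cidr_list:
--             if total > subnet:
--                 total = subnet
--                 break
--     try:
--         return cidr_dict[total]
--     except:
--         return total
-- ===== SOURCE B (Python) =====
-- def cidr_convert(total):
--     '''Converts a total IP-address count to its CIDR block notation via bit
--        arithmetic instead of a lookup table: snap down to the nearest power of
--        two (floor log2), capped at /8.'''
--     total = int(total)
--     if total < 8:
--         return total
--     j = min(total.bit_length() - 1, 24)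
--     return "/" + str(32 - j)
-- ===== Notes on version B (the rewrite author's own statement) =====
-- stated objective: simpler
-- what changed: Replaces the 22-entry lookup dict plus sorted-keys linear snap-down scan with direct bit arithmetic: floor log2 via bit_length, capped at 24, giving '/'+str(32-j).
-- outside the precondition, e.g. on cidr_convert(5): A returns 5, B returns 5
import Mathlib
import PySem

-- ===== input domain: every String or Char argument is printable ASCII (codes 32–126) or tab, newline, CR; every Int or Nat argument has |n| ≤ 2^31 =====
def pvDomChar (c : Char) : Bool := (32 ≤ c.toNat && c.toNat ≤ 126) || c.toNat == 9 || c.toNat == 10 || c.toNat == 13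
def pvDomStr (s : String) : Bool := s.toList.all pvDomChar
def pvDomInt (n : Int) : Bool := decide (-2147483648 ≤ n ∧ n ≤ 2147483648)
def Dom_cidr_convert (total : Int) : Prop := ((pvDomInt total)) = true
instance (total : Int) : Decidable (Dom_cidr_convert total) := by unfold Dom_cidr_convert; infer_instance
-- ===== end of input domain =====

-- B replaces A's lookup dict + sorted-keys snap-down scan with bit arithmetic (floor log2 capped at 24); objective: simpler.


-- ===== PORT A =====
def cidrDict : PySem.Dict Int String :=
  PySem.Dict.ofList [(16777216,"/8"), (8388608,"/9"), (4194304,"/10"), (2097152,"/11"),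
    (1048576,"/12"), (524288,"/13"), (262144,"/14"), (131072,"/15"), (65536,"/16"),
    (32768,"/17"), (16384,"/18"), (8192,"/19"), (4096,"/20"), (2048,"/21"), (1024,"/22"),
    (512,"/23"), (256,"/24"), (128,"/25"), (64,"/26"), (32,"/27"), (16,"/28"), (8,"/29")]

def cidrList : List Int := PySem.List.sorted cidrDict.keys (fun x => x) true

-- `for subnet in cidr_list: if total > subnet: total = subnet; break` (no hit: total unchanged)
def snapDown (total : Int) : Int :=
  match cidrList.find? (fun subnet => decide (subnet < total)) with
  | some subnet => subnet
  | none => total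

def cidr_convert (total : Int) : String :=
  let total := if cidrDict.contains total then total else snapDown total
  match cidrDict.get? total with
  | some v => v
  | none => PySem.Int.toStr total
  -- On the `none` branch Python returns the INT `total` (not a str); those inputs (total < 8) are outside Pre_.

-- ===== PORT B =====
def cidr_convert_alt (total : Int) : String :=
  if total < 8 then PySem.Int.toStr total
    -- Python B returns the int `total` unchanged here; outside Pre_.
  else
    -- j = min(total.bit_length() - 1, 24); total ≥ 8 so bit_length - 1 = Nat.log2
    let j : Int := min ((Nat.log2 total.toNat : Int)) 24
    "/" ++ PySem.Int.toStr (32 - j)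

-- ===== PRECONDITION & SPEC =====
-- Pre_ excludes total < 8: there A falls through its dict lookup and returns the raw int
-- `total` itself, which is not a value of the declared return type str (B does the same in Python).
def Pre_cidr_convert (total : Int) : Prop := 8 ≤ total
instance (total : Int) : Decidable (Pre_cidr_convert total) := by unfold Pre_cidr_convert; infer_instance
def pvWitness_cidr_convert : Int := (256)

def Spec_cidr_convert (total : Int) (out : String) : Prop := out = cidr_convert_alt total
instance (total : Int) (out : String) : Decidable (Spec_cidr_convert total out) := by unfold Spec_cidr_convert; infer_instance

-- ===== CLAIM (what is proved, stated in full; the proofs are below) =====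
def Claim_equal_cidr_convert : Prop := ∀ (total : Int), Dom_cidr_convert total → Pre_cidr_convert total → Spec_cidr_convert total (cidr_convert total)

-- ===== LEMMAS AND PROOFS =====

theorem cidrDict_mk : cidrDict = PySem.Dict.mk [(16777216,"/8"), (8388608,"/9"), (4194304,"/10"), (2097152,"/11"),
    (1048576,"/12"), (524288,"/13"), (262144,"/14"), (131072,"/15"), (65536,"/16"),
    (32768,"/17"), (16384,"/18"), (8192,"/19"), (4096,"/20"), (2048,"/21"), (1024,"/22"),
    (512,"/23"), (256,"/24"), (128,"/25"), (64,"/26"), (32,"/27"), (16,"/28"), (8,"/29")] := by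
  decide

theorem cidrList_eval : cidrList = [16777216, 8388608, 4194304, 2097152, 1048576, 524288,
    262144, 131072, 65536, 32768, 16384, 8192, 4096, 2048, 1024, 512, 256, 128, 64, 32, 16, 8] := by
  decide

theorem B_eval (total : Int) (h8 : ¬ total < 8) :
    cidr_convert_alt total = "/" ++ PySem.Int.toStr (32 - min ((Nat.log2 total.toNat : Int)) 24) := by
  simp [cidr_convert_alt, h8]

-- ===== VERDICT (by name: the statement is the Claim_ definition above) =====
set_option maxHeartbeats 2000000 in
theorem cidr_convert_spec : Claim_equal_cidr_convert := by
  intro total hdom hpre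
  unfold Spec_cidr_convert
  unfold Dom_cidr_convert pvDomInt at hdom
  unfold Pre_cidr_convert at hpre
  simp only [decide_eq_true_eq] at hdom
  have hne : total.toNat ≠ 0 := by omega
  have hlow : 2 ^ Nat.log2 total.toNat ≤ total.toNat := Nat.log2_self_le hne
  have hhigh : total.toNat < 2 ^ (Nat.log2 total.toNat + 1) := Nat.lt_log2_self
  have hj3 : 3 ≤ Nat.log2 total.toNat := (Nat.le_log2 hne).mpr (by omega)
  have hj31 : Nat.log2 total.toNat ≤ 31 := by
    have h32 := (Nat.log2_lt hne).mpr (show total.toNat < 2 ^ 32 by omega)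
    omega
  rw [B_eval total (by omega)]
  obtain ⟨j, hj⟩ : ∃ j, Nat.log2 total.toNat = j := ⟨_, rfl⟩
  rw [hj] at hlow hhigh hj3 hj31 ⊢
  by_cases hcon : cidrDict.contains total = true
  case pos =>
    rw [cidrDict_mk, PySem.Dict.contains_mk] at hcon
    simp only [List.any_cons, List.any_nil, beq_iff_eq, Bool.or_eq_true, Bool.false_eq_true, or_false] at hcon
    interval_cases j <;>
      (rcases hcon with h|h|h|h|h|h|h|h|h|h|h|h|h|h|h|h|h|h|h|h|h|h
       <;> first
        | (exfalso; omega)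
        | (subst h; decide))
  case neg =>
    have hcfalse : cidrDict.contains total = false := by
      rw [Bool.not_eq_true] at hcon; exact hcon
    have hkeys := hcfalse
    rw [cidrDict_mk, PySem.Dict.contains_mk] at hkeys
    simp at hkeys
    unfold cidr_convert snapDown
    rw [hcfalse, cidrList_eval]
    simp only [Bool.false_eq_true, if_false]
    interval_cases j <;>
      (repeat rw [List.find?_cons_of_neg (by simp; omega)]) <;>
      rw [List.find?_cons_of_pos (by simp; omega)] <;> rfl
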